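-- pv_equiv track=rewrite | github.com/zwang-bioinformatics/HiC2MicroC | src/utils.py | get_started_index_for_cooler
-- ===== SOURCE A (Python) =====
-- import math
--
-- def get_started_index_for_cooler(chrids, chromsizes, res=5000):
--     '''
--     index used for generating COO matrices
--     '''
--     chr_start_index = {}
--     cump_index = 0
--     for i, chrid in enumerate(chrids):
--         chr_len = chromsizes[i]
--         num_bins = math.ceil(chr_len / res)
--         chr_start_index[chrid] = cump_index
--         cump_index += num_bins
--
--     return chr_start_index
-- ===== SOURCE B (Python) =====
-- import math
--
-- def get_started_index_for_cooler(chrids, chromsizes, res=5000):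
--     '''
--     index used for generating COO matrices
--     '''
--     return {chrid: sum(math.ceil(s / res) for s in chromsizes[:i])
--             for i, chrid in enumerate(chrids)}
-- ===== Notes on version B (the rewrite author's own statement) =====
-- stated objective: alternative
-- what changed: Drops the running accumulator entirely: each chromosome's start index is computed independently as the direct sum of bin counts over the prefix slice chromsizes[:i], in a single dict comprehension (brute-force per-key summation instead of one fused stateful pass).
import Mathlib
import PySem

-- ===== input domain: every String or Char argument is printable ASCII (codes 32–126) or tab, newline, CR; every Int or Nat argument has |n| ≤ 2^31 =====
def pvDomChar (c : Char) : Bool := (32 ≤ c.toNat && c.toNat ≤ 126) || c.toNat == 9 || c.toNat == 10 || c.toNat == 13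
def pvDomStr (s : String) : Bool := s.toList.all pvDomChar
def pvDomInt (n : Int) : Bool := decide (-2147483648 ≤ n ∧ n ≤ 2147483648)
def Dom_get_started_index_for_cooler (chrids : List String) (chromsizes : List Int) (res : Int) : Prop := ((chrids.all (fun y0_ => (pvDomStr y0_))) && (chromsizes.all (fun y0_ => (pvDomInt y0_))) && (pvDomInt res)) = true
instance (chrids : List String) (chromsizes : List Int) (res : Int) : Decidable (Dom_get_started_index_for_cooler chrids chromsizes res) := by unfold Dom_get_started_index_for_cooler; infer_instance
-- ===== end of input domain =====

-- ===== PORT A =====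
-- B drops A's running accumulator: each start index is the direct sum over the prefix slice
-- chromsizes[:i] in a dict comprehension (per-key summation instead of one fused stateful pass).
-- math.ceil(chr_len / res) is ported as ceiling division -((-chr_len) // res): exact for |chr_len|, |res| <= 2^31
-- (the float quotient's rounding error is below the distance of any non-integer quotient from an integer).
def get_started_index_for_cooler (chrids : List String) (chromsizes : List Int) (res : Int) : List (String × Int) :=
  (((PySem.List.enumerate chrids 0).foldl
    (fun (st : PySem.Dict String Int × Int) (p : Int × String) =>
      let chr_len := (PySem.List.pyGet? chromsizes p.1).getD 0   -- none (IndexError) excluded by Pre_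
      let num_bins := -(PySem.Int.floordiv (-chr_len) res)
      (st.1.insert p.2 st.2, st.2 + num_bins))
    (PySem.Dict.empty, 0)).1).items

-- ===== PORT B =====
-- chromsizes[:i] with i = the (nonnegative) enumerate index is List.take i; the dict
-- comprehension is dict-of-pairs in iteration order (last value wins), i.e. Dict.ofList.
def get_started_index_for_cooler_alt (chrids : List String) (chromsizes : List Int) (res : Int) : List (String × Int) :=
  (PySem.Dict.ofList ((PySem.List.enumerate chrids 0).map
    (fun p => (p.2, ((chromsizes.take p.1.toNat).map
                      (fun s => -(PySem.Int.floordiv (-s) res))).sum)))).items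

-- ===== PRECONDITION & SPEC =====
-- Pre_ excludes exactly the inputs where A raises: res = 0 (ZeroDivisionError) and
-- chrids longer than chromsizes (IndexError on chromsizes[i]).
def Pre_get_started_index_for_cooler (chrids : List String) (chromsizes : List Int) (res : Int) : Prop :=
  res ≠ 0 ∧ chrids.length ≤ chromsizes.length
instance (chrids : List String) (chromsizes : List Int) (res : Int) : Decidable (Pre_get_started_index_for_cooler chrids chromsizes res) := by unfold Pre_get_started_index_for_cooler; infer_instance
def pvWitness_get_started_index_for_cooler : List String × List Int × Int := (["chr1", "chr2"], [10007, 250], 100)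
def Spec_get_started_index_for_cooler (chrids : List String) (chromsizes : List Int) (res : Int) (out : List (String × Int)) : Prop := out = get_started_index_for_cooler_alt chrids chromsizes res
instance (chrids : List String) (chromsizes : List Int) (res : Int) (out : List (String × Int)) : Decidable (Spec_get_started_index_for_cooler chrids chromsizes res out) := by unfold Spec_get_started_index_for_cooler; infer_instance

-- ===== CLAIM (what is proved, stated in full; the proofs are below) =====
def Claim_equal_get_started_index_for_cooler : Prop := ∀ (chrids : List String) (chromsizes : List Int) (res : Int), Dom_get_started_index_for_cooler chrids chromsizes res → Pre_get_started_index_for_cooler chrids chromsizes res → Spec_get_started_index_for_cooler chrids chromsizes res (get_started_index_for_cooler chrids chromsizes res)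

-- ===== LEMMAS AND PROOFS =====

-- A's fold over enumerate equals a fold over chrids zipped with the remaining chromsizes.
lemma foldA_eq_zip (cs : List Int) (res : Int) :
    ∀ (xs : List String) (s : Nat) (d : PySem.Dict String Int) (c : Int),
      xs.length ≤ (cs.drop s).length →
      (PySem.List.enumerate xs (s : Int)).foldl
        (fun (st : PySem.Dict String Int × Int) (p : Int × String) =>
          (st.1.insert p.2 st.2,
           st.2 + -(PySem.Int.floordiv (-((PySem.List.pyGet? cs p.1).getD 0)) res)))
        (d, c)
      = (xs.zip (cs.drop s)).foldl
          (fun (st : PySem.Dict String Int × Int) (p : String × Int) =>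
            (st.1.insert p.1 st.2, st.2 + -(PySem.Int.floordiv (-p.2) res)))
          (d, c) := by
  intro xs
  induction xs with
  | nil => intro s d c _; simp [PySem.List.enumerate_nil]
  | cons x xs ih =>
    intro s d c h
    obtain ⟨z, zs, hz⟩ : ∃ z zs, cs.drop s = z :: zs := by
      cases hd : cs.drop s with
      | nil => rw [hd] at h; simp at h
      | cons z zs => exact ⟨z, zs, rfl⟩
    have hget : PySem.List.pyGet? cs (s : Int) = some z := by
      have h1 : cs[s]? = some z := by
        simpa [hz] using (List.getElem?_drop : (List.drop s cs)[0]? = cs[s + 0]?).symm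
      simpa [PySem.List.pyGet?_natCast] using h1
    have hdrop : cs.drop (s + 1) = zs := by
      have : cs.drop (s + 1) = (cs.drop s).drop 1 := by
        rw [List.drop_drop]
      simp [this, hz]
    have hlen : xs.length ≤ (cs.drop (s + 1)).length := by
      rw [hdrop]; rw [hz] at h; simpa using h
    rw [PySem.List.enumerate_cons]
    simp only [List.foldl_cons, hz, List.zip_cons_cons, hget, Option.getD_some]
    have := ih (s + 1) (d.insert x c)
      (c + -(PySem.Int.floordiv (-z) res)) hlen
    rw [show ((s : Int) + 1) = ((s + 1 : Nat) : Int) by push_cast; ring]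
    rw [this, hdrop]

-- The zip fold's dict component equals folding plain inserts over chrids zipped with prefix sums.
lemma foldZip_eq_scanl (res : Int) :
    ∀ (xs : List String) (zs : List Int) (d : PySem.Dict String Int) (c : Int),
      xs.length ≤ zs.length →
      ((xs.zip zs).foldl
        (fun (st : PySem.Dict String Int × Int) (p : String × Int) =>
          (st.1.insert p.1 st.2, st.2 + -(PySem.Int.floordiv (-p.2) res)))
        (d, c)).1
      = (xs.zip ((zs.map (fun v => -(PySem.Int.floordiv (-v) res))).scanl
            (fun a b => a + b) c)).foldl
          (fun (d : PySem.Dict String Int) (p : String × Int) => d.insert p.1 p.2) d := by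
  intro xs
  induction xs with
  | nil => intro zs d c _; simp
  | cons x xs ih =>
    intro zs d c h
    cases zs with
    | nil => simp at h
    | cons z zs =>
      simp only [List.map_cons, List.scanl_cons, List.zip_cons_cons, List.foldl_cons]
      exact ih zs (d.insert x c) (c + -(PySem.Int.floordiv (-z) res)) (by simpa using h)

-- zip-with-prefix-sums equals B's enumerate-map with per-index prefix-slice sums.
lemma zip_scanl_eq_enumMap (f : Int → Int) :
    ∀ (xs : List String) (ys : List Int) (s : Nat) (c : Int),
      xs.length ≤ ys.length →
      xs.zip ((ys.map f).scanl (fun a b => a + b) c)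
      = (PySem.List.enumerate xs (s : Int)).map
          (fun p => (p.2, c + ((ys.take (p.1.toNat - s)).map f).sum)) := by
  intro xs
  induction xs with
  | nil => intro ys s c _; simp [PySem.List.enumerate_nil]
  | cons x xs ih =>
    intro ys s c h
    cases ys with
    | nil => simp at h
    | cons y ys =>
      rw [PySem.List.enumerate_cons]
      simp only [List.map_cons, List.scanl_cons, List.zip_cons_cons,
        Int.toNat_natCast, Nat.sub_self, List.take_zero, List.map_nil, List.sum_nil,
        add_zero]
      congr 1
      rw [show ((s : Int) + 1) = ((s + 1 : Nat) : Int) by push_cast; ring]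
      rw [ih ys (s + 1) (c + f y) (by simpa using h)]
      refine List.map_congr_left ?_
      intro p hp
      obtain ⟨k, hk, rfl⟩ := (PySem.List.mem_enumerate_iff _ _ _).1 hp
      have h1 : (((s + 1 : Nat) : Int) + (k : Int)).toNat = s + 1 + k := by
        omega
      simp only [h1]
      have h2 : s + 1 + k - s = (s + 1 + k - (s + 1)) + 1 := by omega
      rw [h2, List.take_succ_cons]
      simp [add_assoc]

-- dict(pairs) is the insert fold.
lemma ofList_eq_foldl_insert (ps : List (String × Int)) :
    PySem.Dict.ofList ps
      = ps.foldl (fun (d : PySem.Dict String Int) (p : String × Int) => d.insert p.1 p.2)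
          PySem.Dict.empty := by
  rfl

-- ===== VERDICT (by name: the statement is the Claim_ definition above) =====
theorem get_started_index_for_cooler_spec : Claim_equal_get_started_index_for_cooler := by
  intro chrids chromsizes res _ hpre
  unfold Spec_get_started_index_for_cooler
  unfold get_started_index_for_cooler get_started_index_for_cooler_alt
  dsimp only
  obtain ⟨_, hlen⟩ := hpre
  have h0 : chrids.length ≤ (chromsizes.drop 0).length := by simpa using hlen
  have hA := foldA_eq_zip chromsizes res chrids 0 PySem.Dict.empty 0 h0
  simp only [Nat.cast_zero, List.drop_zero] at hA
  rw [hA, foldZip_eq_scanl res chrids chromsizes PySem.Dict.empty 0 hlen]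
  rw [zip_scanl_eq_enumMap (fun v => -(PySem.Int.floordiv (-v) res)) chrids chromsizes 0 0 hlen]
  rw [ofList_eq_foldl_insert]
  refine congrArg _ ?_
  simp only [Nat.cast_zero, Nat.sub_zero, zero_add]
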